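-- pv_equiv track=rewrite | github.com/Kpianka/steganoFinal | main.py | embed_watermark_1
-- ===== SOURCE A (Python) =====
-- def embed_watermark_1(html_lines, binary_message):
--     watermark_lines = []
--     message_index = 0
--     message_length = len(binary_message)
--     added_end_of_message = False
--
--     for line in html_lines:
--         if message_index < message_length:
--             if binary_message[message_index] == '1':
--                 watermark_lines.append(line + ' ')
--             else:
--                 watermark_lines.append(line)
--             message_index += 1
--         elif not added_end_of_message:
--             watermark_lines.append(line + '  ')
--             added_end_of_message = True
--         else:
--             watermark_lines.append(line)
--
--     return watermark_lines
-- ===== SOURCE B (Python) =====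
-- def embed_watermark_1(html_lines, binary_message):
--     # Copy the input unchanged, then sparsely patch only the positions that
--     # need a marker: each '1'-bit position gets one space, and the first line
--     # after the message (if any) gets two spaces.
--     result = list(html_lines)
--     k = min(len(binary_message), len(html_lines))
--     for i in range(k):
--         if binary_message[i] == '1':
--             result[i] = result[i] + ' '
--     if len(binary_message) < len(html_lines):
--         result[len(binary_message)] = result[len(binary_message)] + '  '
--     return result
-- ===== Notes on version B (the rewrite author's own statement) =====
-- stated objective: alternative
-- what changed: Instead of rebuilding the output line by line with a message index and an end-of-message flag, B copies the input list unchanged and then sparsely patches it in place: one space at each '1'-bit index (iterating over bit positions, not lines), and two spaces at index len(binary_message) when a line follows the message.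
import Mathlib
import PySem

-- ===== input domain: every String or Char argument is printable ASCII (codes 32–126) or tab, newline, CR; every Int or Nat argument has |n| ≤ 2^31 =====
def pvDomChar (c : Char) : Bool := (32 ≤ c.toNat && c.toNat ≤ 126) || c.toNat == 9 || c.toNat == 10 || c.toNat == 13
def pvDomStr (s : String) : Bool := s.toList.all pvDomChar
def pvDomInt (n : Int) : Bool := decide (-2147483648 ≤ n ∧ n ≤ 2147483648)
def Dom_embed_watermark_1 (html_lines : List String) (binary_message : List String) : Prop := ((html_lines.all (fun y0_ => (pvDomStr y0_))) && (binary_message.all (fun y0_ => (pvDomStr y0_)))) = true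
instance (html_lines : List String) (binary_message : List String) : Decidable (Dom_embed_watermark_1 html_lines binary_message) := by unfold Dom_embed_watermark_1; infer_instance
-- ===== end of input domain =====

-- B copies the input list unchanged and sparsely patches it in place (one space per '1'-bit index, two spaces at the first post-message index), instead of A's stateful line-by-line rebuild with a message index and an end-of-message flag (objective: alternative).


-- ===== PORT A =====
-- loop of A: structural recursion over the same state (message_index, added_end_of_message)
def ewLoop (binary_message : List String) : List String → Int → Bool → List String
  | [], _, _ => []
  | line :: rest, i, flag =>
    if i < (binary_message.length : Int) then
      if PySem.List.pyGet? binary_message i = some "1" then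
        (line ++ " ") :: ewLoop binary_message rest (i + 1) flag
      else
        line :: ewLoop binary_message rest (i + 1) flag
    else if !flag then
      (line ++ "  ") :: ewLoop binary_message rest i true
    else
      line :: ewLoop binary_message rest i flag

def embed_watermark_1 (html_lines : List String) (binary_message : List String) : List String :=
  ewLoop binary_message html_lines 0 false

-- ===== PORT B =====
-- copy-then-patch: fold over the bit positions, patching result[i] in place; then one boundary patch
def embed_watermark_1_alt (html_lines : List String) (binary_message : List String) : List String :=
  let k := min binary_message.length html_lines.length
  let result := (List.range k).foldl
    (fun acc i =>
      if binary_message.getD i "" = "1" then acc.set i (acc.getD i "" ++ " ") else acc)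
    html_lines
  if binary_message.length < html_lines.length then
    result.set binary_message.length (result.getD binary_message.length "" ++ "  ")
  else
    result

-- ===== PRECONDITION & SPEC =====
def Spec_embed_watermark_1 (html_lines : List String) (binary_message : List String) (out : List String) : Prop := out = embed_watermark_1_alt html_lines binary_message
instance (html_lines : List String) (binary_message : List String) (out : List String) : Decidable (Spec_embed_watermark_1 html_lines binary_message out) := by unfold Spec_embed_watermark_1; infer_instance

-- ===== CLAIM (what is proved, stated in full; the proofs are below) =====
def Claim_equal_embed_watermark_1 : Prop := ∀ (html_lines : List String) (binary_message : List String), Dom_embed_watermark_1 html_lines binary_message → Spec_embed_watermark_1 html_lines binary_message (embed_watermark_1 html_lines binary_message)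

-- ===== LEMMAS AND PROOFS =====

lemma ewLoop_flag_true (msg : List String) (lines : List String) (i : Int)
    (h : (msg.length : Int) ≤ i) : ewLoop msg lines i true = lines := by
  induction lines with
  | nil => rfl
  | cons l rest ih => simp [ewLoop, not_lt.mpr h, ih]

lemma ewLoop_main (msg : List String) (lines : List String) (k : Nat) (hk : k ≤ msg.length) :
    ewLoop msg lines (k : Int) false =
      (lines.zip (msg.drop k)).map (fun p => if p.2 = "1" then p.1 ++ " " else p.1) ++
      (match lines.drop (msg.length - k) with
       | [] => []
       | t :: ts => (t ++ "  ") :: ts) := by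
  induction lines generalizing k with
  | nil => simp [ewLoop]
  | cons l rest ih =>
    rcases lt_or_eq_of_le hk with hlt | heq
    · have hi : (k : Int) < (msg.length : Int) := by exact_mod_cast hlt
      have hget : PySem.List.pyGet? msg (k : Int) = msg[k]? := by
        simp [PySem.List.pyGet?, PySem.List.pyIdx?, hlt]
      have hdrop : msg.drop k = msg[k] :: msg.drop (k + 1) := List.drop_eq_getElem_cons hlt
      have hsub : msg.length - k = (msg.length - (k + 1)) + 1 := by omega
      have ihk := ih (k + 1) hlt
      push_cast at ihk
      simp only [ewLoop, hi, if_pos, hget, hdrop, hsub, List.zip_cons_cons, List.map_cons,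
        List.drop_succ_cons, List.getElem?_eq_getElem hlt]
      by_cases hb : msg[k] = "1" <;> simp [hb, ihk]
    · subst heq
      have hft := ewLoop_flag_true msg rest (msg.length : Int) le_rfl
      simp [ewLoop, hft]

-- the patch step of B
def ewStep (m : List String) (acc : List String) (i : Nat) : List String :=
  if m.getD i "" = "1" then acc.set i (acc.getD i "" ++ " ") else acc

lemma ewStep_getD (m acc : List String) (i j : Nat) :
    (ewStep m acc i)[j]?.getD "" =
      if i = j ∧ i < acc.length ∧ m[i]?.getD "" = "1" then acc[i]?.getD "" ++ " "
      else acc[j]?.getD "" := by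
  unfold ewStep
  simp only [List.getD_eq_getElem?_getD]
  by_cases hbit : m[i]?.getD "" = "1"
  · rw [if_pos hbit, List.getElem?_set]
    by_cases hij : i = j
    · subst hij
      by_cases hlen : i < acc.length
      · simp [hlen, hbit]
      · simp [hlen, hbit]
    · simp [hij]
  · simp [hbit]

lemma ewFold_length (m : List String) (is : List Nat) (l : List String) :
    (is.foldl (ewStep m) l).length = l.length := by
  induction is generalizing l with
  | nil => rfl
  | cons i is ih =>
    simp only [List.foldl_cons, ih, ewStep]
    split <;> simp

lemma ewFold_getD (m l : List String) (k : Nat) (hk : k ≤ l.length) (j : Nat) :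
    ((List.range k).foldl (ewStep m) l)[j]?.getD "" =
      if j < k then (if m[j]?.getD "" = "1" then l[j]?.getD "" ++ " " else l[j]?.getD "")
      else l[j]?.getD "" := by
  induction k generalizing j with
  | zero => simp
  | succ k ih =>
    have hk' : k ≤ l.length := Nat.le_of_succ_le hk
    have hlen : ((List.range k).foldl (ewStep m) l).length = l.length := ewFold_length m _ l
    rw [List.range_succ, List.foldl_append, List.foldl_cons, List.foldl_nil, ewStep_getD]
    split
    · rename_i h
      obtain ⟨hij, _, hbit⟩ := h
      subst hij
      rw [ih hk' k, if_neg (by omega)]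
      simp [hbit, (by omega : k < k + 1)]
    · rename_i h
      rw [ih hk' j]
      by_cases hjk : j < k
      · simp [hjk, (by omega : j < k + 1)]
      · by_cases hje : j = k
        · subst hje
          have hbit : ¬ m[j]?.getD "" = "1" := by
            intro hb; exact h ⟨rfl, by omega, hb⟩
          simp [hbit, (by omega : j < j + 1)]
        · simp only [if_neg hjk, if_neg (show ¬ j < k + 1 by omega)]

lemma getD_zipmap (l m : List String) (j : Nat) (hj : j < min l.length m.length) :
    ((l.zip m).map (fun p => if p.2 = "1" then p.1 ++ " " else p.1))[j]?.getD "" =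
      (if m[j]?.getD "" = "1" then l[j]?.getD "" ++ " " else l[j]?.getD "") := by
  have hl : j < l.length := lt_of_lt_of_le hj (min_le_left _ _)
  have hm : j < m.length := lt_of_lt_of_le hj (min_le_right _ _)
  have hz : j < (l.zip m).length := by simp [List.length_zip]; omega
  rw [List.getElem?_eq_getElem (by simpa using hz), List.getElem_map, List.getElem_zip]
  simp [List.getElem?_eq_getElem hl, List.getElem?_eq_getElem hm]

-- A's value, elementwise
lemma A_getD (l m : List String) (j : Nat) (hj : j < l.length) :
    (embed_watermark_1 l m)[j]?.getD "" =
      if j < min m.length l.length then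
        (if m[j]?.getD "" = "1" then l[j]?.getD "" ++ " " else l[j]?.getD "")
      else if j = m.length then l[j]?.getD "" ++ "  "
      else l[j]?.getD "" := by
  unfold embed_watermark_1
  have h := ewLoop_main m l 0 (Nat.zero_le _)
  simp only [Nat.cast_zero, List.drop_zero, Nat.sub_zero] at h
  rw [h]
  set P := (l.zip m).map (fun p : String × String => if p.2 = "1" then p.1 ++ " " else p.1)
    with hP
  have hPlen : P.length = min l.length m.length := by simp [hP]
  by_cases hlm : m.length < l.length
  · have hdrop : l.drop m.length = l[m.length] :: l.drop (m.length + 1) :=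
      List.drop_eq_getElem_cons hlm
    rw [hdrop]
    by_cases hjP : j < min l.length m.length
    · rw [List.getElem?_append_left (by omega), hP, getD_zipmap l m j hjP]
      simp [show j < min m.length l.length by omega]
    · have hjm : m.length ≤ j := by omega
      rw [List.getElem?_append_right (by omega), hPlen]
      have hmin : min l.length m.length = m.length := by omega
      by_cases hje : j = m.length
      · subst hje
        simp [hmin, List.getElem?_eq_getElem hj]
      · have h1 : j - min l.length m.length = (j - min l.length m.length - 1) + 1 := by omega
        rw [h1]
        simp only [List.getElem?_cons_succ]
        rw [List.getElem?_drop]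
        have h2 : m.length + 1 + (j - min l.length m.length - 1) = j := by omega
        rw [h2]
        simp [show ¬ j < min m.length l.length by omega, hje]
  · have hdrop : l.drop m.length = [] := by
      apply List.drop_eq_nil_of_le; omega
    rw [hdrop]
    have hjP : j < min l.length m.length := by omega
    rw [List.getElem?_append_left (by omega), hP, getD_zipmap l m j hjP]
    simp [show j < min m.length l.length by omega]

-- B's value, elementwise
lemma B_getD (l m : List String) (j : Nat) (hj : j < l.length) :
    (embed_watermark_1_alt l m)[j]?.getD "" =
      if j < min m.length l.length then
        (if m[j]?.getD "" = "1" then l[j]?.getD "" ++ " " else l[j]?.getD "")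
      else if j = m.length then l[j]?.getD "" ++ "  "
      else l[j]?.getD "" := by
  unfold embed_watermark_1_alt
  simp only []
  set k := min m.length l.length with hk
  have hFstep : (List.range k).foldl
      (fun acc i => if m.getD i "" = "1" then acc.set i (acc.getD i "" ++ " ") else acc) l
      = (List.range k).foldl (ewStep m) l := rfl
  rw [hFstep]
  set F := (List.range k).foldl (ewStep m) l with hF
  have hFlen : F.length = l.length := ewFold_length m _ l
  have hFgetD : ∀ j', F[j']?.getD "" =
      if j' < k then (if m[j']?.getD "" = "1" then l[j']?.getD "" ++ " " else l[j']?.getD "")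
      else l[j']?.getD "" := fun j' => ewFold_getD m l k (by omega) j'
  by_cases hlm : m.length < l.length
  · rw [if_pos hlm]
    have hkm : k = m.length := min_eq_left hlm.le
    have hnk : ¬ m.length < k := by rw [hkm]; exact lt_irrefl _
    rw [List.getD_eq_getElem?_getD, List.getElem?_set, hFlen]
    by_cases hje : m.length = j
    · subst hje
      have hFm := hFgetD m.length
      rw [if_neg hnk] at hFm
      rw [if_pos rfl, if_pos hj, if_neg hnk, if_pos rfl]
      simp only [Option.getD_some, hFm]
    · rw [if_neg hje, hFgetD j]
      by_cases hjk : j < k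
      · simp only [if_pos hjk]
      · rw [if_neg hjk, if_neg hjk, if_neg (fun h : j = m.length => hje h.symm)]
  · rw [if_neg hlm, hFgetD j]
    have hne : ¬ j = m.length := by omega
    by_cases hjk : j < k
    · simp only [if_pos hjk]
    · rw [if_neg hjk, if_neg hjk, if_neg hne]

lemma A_length (l m : List String) : (embed_watermark_1 l m).length = l.length := by
  unfold embed_watermark_1
  have h := ewLoop_main m l 0 (Nat.zero_le _)
  simp only [Nat.cast_zero, List.drop_zero, Nat.sub_zero] at h
  rw [h]
  by_cases hlm : m.length < l.length
  · rw [List.drop_eq_getElem_cons hlm]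
    simp [List.length_zip]; omega
  · rw [List.drop_eq_nil_of_le (by omega)]
    simp [List.length_zip]; omega

lemma B_length (l m : List String) : (embed_watermark_1_alt l m).length = l.length := by
  unfold embed_watermark_1_alt
  simp only []
  have hFstep : (List.range (min m.length l.length)).foldl
      (fun acc i => if m.getD i "" = "1" then acc.set i (acc.getD i "" ++ " ") else acc) l
      = (List.range (min m.length l.length)).foldl (ewStep m) l := rfl
  rw [hFstep]
  have hFlen := ewFold_length m (List.range (min m.length l.length)) l
  split
  · rw [List.length_set]; exact hFlen
  · exact hFlen

-- ===== VERDICT (by name: the statement is the Claim_ definition above) =====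
theorem embed_watermark_1_spec : Claim_equal_embed_watermark_1 := by
  intro l m _
  unfold Spec_embed_watermark_1
  apply List.ext_getElem?
  intro j
  by_cases hj : j < l.length
  · have hA : j < (embed_watermark_1 l m).length := by rw [A_length]; exact hj
    have hB : j < (embed_watermark_1_alt l m).length := by rw [B_length]; exact hj
    have h1 := A_getD l m j hj
    have h2 := B_getD l m j hj
    rw [List.getElem?_eq_getElem hA] at h1
    rw [List.getElem?_eq_getElem hB] at h2
    simp only [Option.getD_some] at h1 h2
    rw [List.getElem?_eq_getElem hA, List.getElem?_eq_getElem hB, h1, h2]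
  · rw [List.getElem?_eq_none (by rw [A_length]; omega),
      List.getElem?_eq_none (by rw [B_length]; omega)]
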